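-- pv_equiv track=rewrite | github.com/this233/Graph-Agent-for-OpenHarmony | markdown_parser.py | get_heading_hierarchy
-- ===== SOURCE A (Python) =====
-- from typing import Dict, List, Tuple, Optional, Any
--
-- def get_heading_hierarchy(headings: List[Tuple[int, str, int]], current_index: int) -> List[str]:
--     """获取当前标题的层级路径"""
--     if current_index >= len(headings):
--         return []
--
--     current_level = headings[current_index][0]
--     hierarchy = [headings[current_index][1]]
--
--     # 向上查找父级标题
--     for i in range(current_index - 1, -1, -1):
--         level, title, _ = headings[i]
--         if level < current_level:
--             hierarchy.insert(0, title)
--             current_level = level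
--
--     return hierarchy
-- ===== SOURCE B (Python) =====
-- def get_heading_hierarchy(headings, current_index):
--     """Forward pass maintaining an explicit ancestor stack instead of A's backward scan."""
--     if current_index >= len(headings):
--         return []
--     stack = []
--     for i in range(current_index + 1):
--         level, title, _ = headings[i]
--         while stack and stack[-1][0] >= level:
--             stack.pop()
--         stack.append((level, title))
--     return [title for _, title in stack]
-- ===== Notes on version B (the rewrite author's own statement) =====
-- stated objective: alternative
-- what changed: Replaces A's backward scan with a decreasing level threshold by a single forward pass that maintains an explicit ancestor stack (pop entries with level >= current, push) and returns the stack's titles.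
-- intended difference: For negative in-range current_index A's negative-index wraparound accidentally returns just the one wrapped title (its backward loop range is empty), while B returns [], the natural empty hierarchy for a position index that is not a valid forward index. — e.g. on get_heading_hierarchy([(1, "a", 0)], -1): A returns ["a"], B returns []
import Mathlib
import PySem

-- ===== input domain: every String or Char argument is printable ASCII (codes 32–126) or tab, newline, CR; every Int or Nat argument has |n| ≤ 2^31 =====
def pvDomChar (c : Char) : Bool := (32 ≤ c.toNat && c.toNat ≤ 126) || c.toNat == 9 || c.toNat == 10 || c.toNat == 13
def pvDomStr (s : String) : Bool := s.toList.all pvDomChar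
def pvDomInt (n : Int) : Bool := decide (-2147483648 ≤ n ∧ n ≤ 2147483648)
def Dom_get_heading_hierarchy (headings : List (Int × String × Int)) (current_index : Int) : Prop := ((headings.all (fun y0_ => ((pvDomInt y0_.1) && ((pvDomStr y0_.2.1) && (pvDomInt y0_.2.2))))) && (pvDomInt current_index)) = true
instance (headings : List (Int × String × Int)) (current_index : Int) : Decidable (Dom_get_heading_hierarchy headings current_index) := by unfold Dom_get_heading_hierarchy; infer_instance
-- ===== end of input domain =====

-- B replaces A's backward ancestor scan by a forward pass keeping an explicit ancestor stack
-- (a genuinely different traversal of the same data); return-value equivalence only, no mutation.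

-- ===== PORT A =====
-- step of A's backward loop body: state = (hierarchy, current_level)
def ghhAStep (st : List String × Int) (x : Int × String × Int) : List String × Int :=
  if x.1 < st.2 then (x.2.1 :: st.1, x.1) else st

def get_heading_hierarchy (headings : List (Int × String × Int)) (current_index : Int) : List String :=
  if current_index ≥ (headings.length : Int) then []
  else
    match PySem.List.pyGet? headings current_index with
    | none => []  -- IndexError in Python: excluded by Pre_
    | some cur =>
      let r := (PySem.List.pyRange (current_index - 1) (-1) (-1)).foldl
        (fun st i =>
          match PySem.List.pyGet? headings i with
          | none => st  -- unreachable: 0 ≤ i < current_index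
          | some x => ghhAStep st x)
        ([cur.2.1], cur.1)
      r.1

-- ===== PORT B =====
-- Python's `while stack and stack[-1][0] >= level: stack.pop()`; the stack is kept
-- top-first here (Python appends/pops at the right end), so the result is reversed at the end.
def ghhPop : List (Int × String) → Int → List (Int × String)
  | [], _ => []
  | (l, t) :: rest, level => if l ≥ level then ghhPop rest level else (l, t) :: rest

def get_heading_hierarchy_alt (headings : List (Int × String × Int)) (current_index : Int) : List String :=
  if current_index ≥ (headings.length : Int) then []
  else
    let stack := (PySem.List.pyRange 0 (current_index + 1) 1).foldl
      (fun stack i =>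
        match PySem.List.pyGet? headings i with
        | none => stack  -- unreachable: 0 ≤ i ≤ current_index < len
        | some x => (x.1, x.2.1) :: ghhPop stack x.1)
      []
    stack.reverse.map (fun p => p.2)

-- ===== PRECONDITION & SPEC =====
-- Pre_ excludes exactly the inputs where A raises IndexError (current_index < -len(headings)).
def Pre_get_heading_hierarchy (headings : List (Int × String × Int)) (current_index : Int) : Prop :=
  current_index ≥ -(headings.length : Int)
instance (headings : List (Int × String × Int)) (current_index : Int) : Decidable (Pre_get_heading_hierarchy headings current_index) := by unfold Pre_get_heading_hierarchy; infer_instance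
def pvWitness_get_heading_hierarchy : (List (Int × String × Int)) × Int :=
  ([(1, "a", 0), (2, "b", 0), (3, "c", 0), (2, "d", 0)], 3)

-- For negative in-range current_index A's negative-index wraparound accidentally returns just the
-- one wrapped title (its backward loop range is empty), while B returns [], the natural empty
-- hierarchy for a position index that is not a valid forward index.
def D_get_heading_hierarchy (headings : List (Int × String × Int)) (current_index : Int) : Prop :=
  current_index < 0 ∧ -(headings.length : Int) ≤ current_index
instance (headings : List (Int × String × Int)) (current_index : Int) : Decidable (D_get_heading_hierarchy headings current_index) := by unfold D_get_heading_hierarchy; infer_instance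

def Spec_get_heading_hierarchy (headings : List (Int × String × Int)) (current_index : Int) (out : List String) : Prop := ¬ D_get_heading_hierarchy headings current_index → out = get_heading_hierarchy_alt headings current_index
instance (headings : List (Int × String × Int)) (current_index : Int) (out : List String) : Decidable (Spec_get_heading_hierarchy headings current_index out) := by unfold Spec_get_heading_hierarchy; infer_instance

def pvDiffWitness_get_heading_hierarchy : (List (Int × String × Int)) × Int := ([(1, "a", 0)], -1)
def pvDiffWitnessOut_get_heading_hierarchy : (List String) × (List String) := (["a"], [])

-- ===== CLAIM (what is proved, stated in full; the proofs are below) =====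
def Claim_unchanged_get_heading_hierarchy : Prop := ∀ (headings : List (Int × String × Int)) (current_index : Int), Dom_get_heading_hierarchy headings current_index → Pre_get_heading_hierarchy headings current_index → Spec_get_heading_hierarchy headings current_index (get_heading_hierarchy headings current_index)
def Claim_changed_get_heading_hierarchy : Prop := Dom_get_heading_hierarchy (pvDiffWitness_get_heading_hierarchy.1) (pvDiffWitness_get_heading_hierarchy.2) ∧ Pre_get_heading_hierarchy (pvDiffWitness_get_heading_hierarchy.1) (pvDiffWitness_get_heading_hierarchy.2) ∧ D_get_heading_hierarchy (pvDiffWitness_get_heading_hierarchy.1) (pvDiffWitness_get_heading_hierarchy.2) ∧ get_heading_hierarchy (pvDiffWitness_get_heading_hierarchy.1) (pvDiffWitness_get_heading_hierarchy.2) = pvDiffWitnessOut_get_heading_hierarchy.1 ∧ get_heading_hierarchy_alt (pvDiffWitness_get_heading_hierarchy.1) (pvDiffWitness_get_heading_hierarchy.2) = pvDiffWitnessOut_get_heading_hierarchy.2 ∧ pvDiffWitnessOut_get_heading_hierarchy.1 ≠ pvDiffWitnessOut_get_heading_hierarchy.2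
def Claim_exact_get_heading_hierarchy : Prop := ∀ (headings : List (Int × String × Int)) (current_index : Int), Dom_get_heading_hierarchy headings current_index → Pre_get_heading_hierarchy headings current_index → D_get_heading_hierarchy headings current_index → get_heading_hierarchy headings current_index ≠ get_heading_hierarchy_alt headings current_index

-- ===== LEMMAS AND PROOFS =====

-- list-level reference versions of the two loops
def ghhBStep (stack : List (Int × String)) (x : Int × String × Int) : List (Int × String) :=
  (x.1, x.2.1) :: ghhPop stack x.1

-- popping by a smaller-or-equal threshold after a larger one collapses
theorem ghhPop_ghhPop (S : List (Int × String)) (l lvl : Int) (h : lvl ≤ l) :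
    ghhPop (ghhPop S l) lvl = ghhPop S lvl := by
  induction S with
  | nil => rfl
  | cons a r ih =>
    obtain ⟨al, at_⟩ := a
    by_cases hal : al ≥ l
    · have : al ≥ lvl := le_trans h hal
      simp [ghhPop, hal, this, ih]
    · simp [ghhPop, hal]

-- core: A's backward accumulation equals the popped stack of the prefix
theorem ghh_core (pre : List (Int × String × Int)) (lvl : Int) (acc : List String) :
    (pre.reverse.foldl ghhAStep (acc, lvl)).1
      = ((ghhPop (pre.foldl ghhBStep []) lvl).reverse.map (fun p => p.2)) ++ acc := by
  induction pre using List.reverseRecOn generalizing lvl acc with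
  | nil => simp [ghhPop]
  | append_singleton pre x ih =>
    obtain ⟨xl, xt, xe⟩ := x
    rw [List.reverse_append]
    simp only [List.reverse_singleton, List.singleton_append, List.foldl_cons, List.foldl_append,
      List.foldl_cons, List.foldl_nil]
    by_cases hx : xl < lvl
    · have : ¬ (xl ≥ lvl) := by omega
      simp only [ghhAStep, ghhBStep, hx, ghhPop, this]
      rw [ih]
      simp
    · have : xl ≥ lvl := by omega
      simp only [ghhAStep, ghhBStep, if_neg hx, ghhPop, if_pos this]
      rw [ghhPop_ghhPop _ _ _ this, ih]

-- glue for A: the pyRange/pyGet? countdown fold is the fold over the reversed prefix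
theorem ghh_glueA (hs : List (Int × String × Int)) (k : Nat) (hk : k ≤ hs.length)
    (st : List String × Int) :
    (PySem.List.pyRange ((k : Int) - 1) (-1) (-1)).foldl
        (fun st i =>
          match PySem.List.pyGet? hs i with
          | none => st
          | some x => ghhAStep st x) st
      = (hs.take k).reverse.foldl ghhAStep st := by
  induction k generalizing st with
  | zero => simp [PySem.List.pyRange_neg_one_eq_nil]
  | succ n ih =>
    have hlt : n < hs.length := by omega
    have h1 : ((n : Int) + 1 - 1) = (n : Int) := by ring
    have h2 : (-1 : Int) < (n : Int) := by omega
    rw [Nat.cast_add, Nat.cast_one, h1, PySem.List.pyRange_neg_one_cons h2]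
    rw [List.foldl_cons, PySem.List.pyGet?_natCast]
    rw [List.getElem?_eq_getElem hlt]
    rw [ih (by omega)]
    rw [List.take_add_one, List.getElem?_eq_getElem hlt, Option.toList_some,
      List.reverse_append, List.reverse_singleton, List.singleton_append, List.foldl_cons]

-- glue for B: the pyRange/pyGet? forward fold is the fold over the prefix
theorem ghh_glueB (hs : List (Int × String × Int)) (k : Nat) (hk : k ≤ hs.length) :
    (PySem.List.pyRange 0 (k : Int) 1).foldl
        (fun stack i =>
          match PySem.List.pyGet? hs i with
          | none => stack
          | some x => (x.1, x.2.1) :: ghhPop stack x.1) []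
      = (hs.take k).foldl ghhBStep [] := by
  induction k with
  | zero => simp [PySem.List.pyRange_one_eq_nil]
  | succ n ih =>
    have hlt : n < hs.length := by omega
    have h0 : (0 : Int) ≤ (n : Int) := by omega
    rw [Nat.cast_add, Nat.cast_one, PySem.List.pyRange_one_succ_right h0]
    rw [List.foldl_append, ih (by omega), List.foldl_cons, List.foldl_nil]
    rw [PySem.List.pyGet?_natCast, List.getElem?_eq_getElem hlt]
    rw [List.take_add_one, List.getElem?_eq_getElem hlt, Option.toList_some,
      List.foldl_append, List.foldl_cons, List.foldl_nil]
    rfl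

-- A's hierarchy never shrinks along the port's backward fold
theorem ghh_A_len (hs : List (Int × String × Int)) (r : List Int) (st : List String × Int) :
    st.1.length ≤ (r.foldl
      (fun st i =>
        match PySem.List.pyGet? hs i with
        | none => st
        | some x => ghhAStep st x) st).1.length := by
  induction r generalizing st with
  | nil => simp
  | cons a r ih =>
    refine le_trans ?_ (ih _)
    rcases h : PySem.List.pyGet? hs a with _ | x
    · simp [h]
    · simp only [h, ghhAStep]
      split <;> simp

-- ===== VERDICT (by name: the statement is the Claim_ definition above) =====
theorem get_heading_hierarchy_spec : Claim_unchanged_get_heading_hierarchy := by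
  intro hs ci _ hpre hnd
  unfold Pre_get_heading_hierarchy at hpre
  unfold D_get_heading_hierarchy at hnd
  unfold get_heading_hierarchy get_heading_hierarchy_alt
  by_cases hge : ci ≥ (hs.length : Int)
  · simp [hge]
  · simp only [hge]
    have hci0 : 0 ≤ ci := by
      by_contra h
      exact hnd ⟨by omega, by omega⟩
    obtain ⟨k, rfl⟩ : ∃ k : Nat, ci = (k : Int) := ⟨ci.toNat, (Int.toNat_of_nonneg hci0).symm⟩
    have hklt : k < hs.length := by exact_mod_cast lt_of_not_ge hge
    rw [PySem.List.pyGet?_natCast, List.getElem?_eq_getElem hklt]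
    simp only []
    rw [ghh_glueA hs k (by omega)]
    have hk1 : ((k : Int) + 1) = ((k + 1 : Nat) : Int) := by push_cast; ring
    rw [hk1, ghh_glueB hs (k + 1) (by omega)]
    rw [List.take_add_one, List.getElem?_eq_getElem hklt]
    simp only [Option.toList_some, List.foldl_append, List.foldl_cons, List.foldl_nil]
    rw [ghh_core]
    simp [ghhBStep]

theorem get_heading_hierarchy_changed : Claim_changed_get_heading_hierarchy := by
  unfold Claim_changed_get_heading_hierarchy; decide

theorem get_heading_hierarchy_tight : Claim_exact_get_heading_hierarchy := by
  intro hs ci _ _ hd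
  obtain ⟨hneg, hge⟩ := hd
  have hlt : ci < (hs.length : Int) := by
    have : (0 : Int) ≤ (hs.length : Int) := by positivity
    omega
  have hB : get_heading_hierarchy_alt hs ci = [] := by
    unfold get_heading_hierarchy_alt
    rw [if_neg (by omega)]
    rw [PySem.List.pyRange_one_eq_nil (by omega)]
    simp
  have hA : get_heading_hierarchy hs ci ≠ [] := by
    unfold get_heading_hierarchy
    rw [if_neg (by omega)]
    have hin : PySem.Raise.InRange hs.length ci := by
      unfold PySem.Raise.InRange; omega
    obtain ⟨x, hx⟩ : ∃ x, PySem.List.pyGet? hs ci = some x := by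
      cases h : PySem.List.pyGet? hs ci with
      | none => exact absurd hin (by rwa [← PySem.List.pyGet?_eq_none_iff])
      | some x => exact ⟨x, rfl⟩
    rw [hx]
    intro hcontra
    have hlen := ghh_A_len hs (PySem.List.pyRange (ci - 1) (-1) (-1)) ([x.2.1], x.1)
    simp only [hcontra] at hlen
    simp at hlen
  intro heq
  rw [heq, hB] at hA
  exact hA rfl
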